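-- pv_equiv track=rewrite | github.com/NuthanReddy/FutureTech | Problems/Combinations/MaxPalindromes.py | max_palindromes
-- ===== SOURCE A (Python) =====
-- def max_palindromes(slot_lengths, char_freq):
--     """
--     For a palindrome of length L:
--     - We need L // 2 pairs of characters
--     - If L is odd, we need 1 additional character for the center
--
--     Key insight: total characters needed = L (pairs contribute 2 each, center contributes 1)
--     We can use any character for the center, even if it could form a pair.
--     """
--
--     def backtrack(remaining_slots, freq):
--         if not remaining_slots:
--             return 0
--
--         max_count = 0
--         # Try to fill each remaining slot
--         for i, slot_len in enumerate(remaining_slots):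
--             needed_pairs = slot_len // 2
--             needed_center = slot_len % 2
--
--             # Check if we have enough pairs
--             available_pairs = sum(v // 2 for v in freq.values())
--             total_chars = sum(freq.values())
--
--             # After using needed_pairs, we need at least 1 char left for center (if odd)
--             if available_pairs < needed_pairs:
--                 continue
--             if needed_center and total_chars < slot_len:
--                 continue
--
--             # Try to allocate - use pairs first
--             freq_copy = dict(freq)
--             pairs_to_use = needed_pairs
--             for c in list(freq_copy.keys()):
--                 use = min(freq_copy[c] // 2, pairs_to_use)
--                 freq_copy[c] -= use * 2
--                 pairs_to_use -= use
--                 if pairs_to_use == 0: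
--                     break
--
--             if pairs_to_use > 0:
--                 continue
--
--             # Allocate center if needed
--             if needed_center:
--                 center_found = False
--                 for c in freq_copy:
--                     if freq_copy[c] > 0:
--                         freq_copy[c] -= 1
--                         center_found = True
--                         break
--                 if not center_found:
--                     continue
--
--             # Remove this slot and recurse
--             new_slots = remaining_slots[:i] + remaining_slots[i+1:]
--             count = 1 + backtrack(new_slots, freq_copy)
--             max_count = max(max_count, count)
--
--         return max_count
--
--     return backtrack(list(slot_lengths), dict(char_freq))
-- ===== SOURCE B (Python) =====
-- def max_palindromes(slot_lengths, char_freq):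
--     """BFS over (remaining-slots, frequency) states, one level per filled slot,
--     deduplicating equal states in a set, instead of DFS over all slot orders."""
--
--     def alloc(items, L):
--         # Fill one palindrome of length L from the frequency snapshot `items`
--         # (tuple of (char, count)); return the new snapshot, or None if impossible.
--         npairs, ncenter = L // 2, L % 2
--         if sum(v // 2 for _, v in items) < npairs:
--             return None
--         if ncenter and sum(v for _, v in items) < L:
--             return None
--         out, r = [], npairs
--         for idx, (c, v) in enumerate(items):
--             t = min(v // 2, r)
--             out.append((c, v - 2 * t))
--             r -= t
--             if r == 0:
--                 out.extend(items[idx + 1:])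
--                 break
--         if r > 0:
--             return None
--         if ncenter:
--             for j, (c, v) in enumerate(out):
--                 if v > 0:
--                     out[j] = (c, v - 1)
--                     return tuple(out)
--             return None
--         return tuple(out)
--
--     def successors(slots, items):
--         out = []
--         pre = ()
--         for k in range(len(slots)):
--             L = slots[k]
--             nd = alloc(items, L)
--             if nd is not None:
--                 out.append((pre + slots[k + 1:], nd))
--             pre = pre + (L,)
--         return out
--
--     frontier = {(tuple(slot_lengths), tuple(dict(char_freq).items()))}
--     depth = 0
--     for _ in range(len(slot_lengths)):
--         nxt = set()
--         for slots, items in frontier: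
--             nxt.update(successors(slots, items))
--         if not nxt:
--             break
--         frontier = nxt
--         depth += 1
--     return depth
-- ===== Notes on version B (the rewrite author's own statement) =====
-- stated objective: alternative
-- what changed: A's DFS backtracking over all orders of the remaining slots is replaced by a level-synchronized BFS whose frontier is a deduplicated SET of (remaining-slots, frequency) states, so different slot orders reaching the same state are merged instead of re-explored; the answer is the number of non-empty BFS levels.
import Mathlib
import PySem

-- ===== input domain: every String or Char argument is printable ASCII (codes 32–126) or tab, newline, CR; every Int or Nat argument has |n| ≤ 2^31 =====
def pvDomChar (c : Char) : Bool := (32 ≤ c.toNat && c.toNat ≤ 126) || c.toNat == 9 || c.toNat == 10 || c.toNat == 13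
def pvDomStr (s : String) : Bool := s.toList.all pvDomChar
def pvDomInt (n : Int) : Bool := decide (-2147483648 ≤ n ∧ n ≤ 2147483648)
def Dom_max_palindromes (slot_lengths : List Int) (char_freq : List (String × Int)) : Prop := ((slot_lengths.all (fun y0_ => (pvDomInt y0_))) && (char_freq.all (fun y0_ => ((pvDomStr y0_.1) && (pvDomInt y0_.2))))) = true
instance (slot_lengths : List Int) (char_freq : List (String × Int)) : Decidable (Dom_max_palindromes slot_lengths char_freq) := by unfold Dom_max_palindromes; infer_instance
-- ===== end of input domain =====

-- B replaces A's depth-first backtracking over every order of the remaining slots by a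
-- level-synchronized BFS over a deduplicated SET of (remaining-slots, frequency) states,
-- merging states reached by different slot orders (objective: alternative search strategy).

-- ===== PORT A =====
-- the inner 'for c in list(freq_copy.keys()): use = min(...); ...; if pairs_to_use == 0: break'
def pvPairLoopA : List String → PySem.Dict String Int → Int → (PySem.Dict String Int × Int)
  | [], fc, ptu => (fc, ptu)
  | c :: rest, fc, ptu =>
      let v := fc.getD c 0
      let use := min (PySem.Int.floordiv v 2) ptu
      let fc' := fc.insert c (v - use * 2)
      let ptu' := ptu - use
      if ptu' = 0 then (fc', ptu') else pvPairLoopA rest fc' ptu'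

-- the inner 'for c in freq_copy: if freq_copy[c] > 0: freq_copy[c] -= 1; break'
def pvCenterLoopA : List String → PySem.Dict String Int → Option (PySem.Dict String Int)
  | [], _ => none
  | c :: rest, fc =>
      if fc.getD c 0 > 0 then some (fc.insert c (fc.getD c 0 - 1)) else pvCenterLoopA rest fc

-- the body of A's slot loop up to the recursion: all the 'continue' checks and the
-- allocation of pairs and center (none = 'continue')
def pvAllocA (f : PySem.Dict String Int) (L : Int) : Option (PySem.Dict String Int) :=
  let np := PySem.Int.floordiv L 2
  let nc := PySem.Int.mod L 2
  let availP := (f.values.map (fun v => PySem.Int.floordiv v 2)).sum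
  let T := f.values.sum
  if availP < np then none
  else if nc ≠ 0 ∧ T < L then none
  else
    let p := pvPairLoopA f.keys f np
    if 0 < p.2 then none
    else if nc ≠ 0 then pvCenterLoopA p.1.keys p.1
    else some p.1

lemma pvNewSlots_length (slots : List Int) (i : Nat) (h : i < slots.length) :
    (PySem.List.slice slots none (some (i : Int)) ++
      PySem.List.slice slots (some ((i : Int) + 1)) none).length < slots.length := by
  rw [PySem.List.slice_to slots (by omega : (0:Int) ≤ (i : Int)),
      PySem.List.slice_from slots (by omega : (0:Int) ≤ (i : Int) + 1)]
  have h1 : ((i : Int)).toNat = i := by omega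
  have h2 : ((i : Int) + 1).toNat = i + 1 := by omega
  rw [h1, h2]
  simp only [List.length_append, List.length_take, List.length_drop]
  omega

mutual
def pvBacktrackA (slots : List Int) (f : PySem.Dict String Int) : Int :=
  if slots = [] then 0 else pvTryA slots f 0 slots 0 (by simp)
termination_by (slots.length, slots.length + 1)

def pvTryA (slots : List Int) (f : PySem.Dict String Int) (i : Nat) (rest : List Int)
    (mc : Int) (h : i + rest.length = slots.length) : Int :=
  match rest, h with
  | [], _ => mc
  | L :: rest', h =>
    let mc' :=
      match pvAllocA f L with
      | none => mc
      | some fc =>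
          max mc (1 + pvBacktrackA
            (PySem.List.slice slots none (some (i : Int)) ++
              PySem.List.slice slots (some ((i : Int) + 1)) none) fc)
    pvTryA slots f (i + 1) rest' mc' (by simp only [List.length_cons] at h; omega)
termination_by (slots.length, rest.length)
decreasing_by
  · exact Prod.Lex.left _ _ (by have := pvNewSlots_length slots i (by simp only [List.length_cons] at h; omega); omega)
  · exact Prod.Lex.right _ (by simp only [List.length_cons]; omega)
end

def max_palindromes (slot_lengths : List Int) (char_freq : List (String × Int)) : Int :=
  pvBacktrackA slot_lengths (PySem.Dict.ofList char_freq)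

-- ===== PORT B =====
-- B's pair loop over the frequency snapshot (list of (char, count)); 'break' = keep the tail
def pvPairScanB : List (String × Int) → Int → (List (String × Int) × Int)
  | [], r => ([], r)
  | (c, v) :: rest, r =>
      let t := min (PySem.Int.floordiv v 2) r
      let r' := r - t
      if r' = 0 then ((c, v - 2 * t) :: rest, 0)
      else
        let p := pvPairScanB rest r'
        ((c, v - 2 * t) :: p.1, p.2)

-- B's center loop: decrement the first positive count
def pvCenterScanB : List (String × Int) → Option (List (String × Int))
  | [] => none
  | (c, v) :: rest =>
      if v > 0 then some ((c, v - 1) :: rest)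
      else (pvCenterScanB rest).map (fun out => (c, v) :: out)

def pvAllocB (items : List (String × Int)) (L : Int) : Option (List (String × Int)) :=
  let np := PySem.Int.floordiv L 2
  let nc := PySem.Int.mod L 2
  if (items.map (fun cv => PySem.Int.floordiv cv.2 2)).sum < np then none
  else if nc ≠ 0 ∧ (items.map (fun cv => cv.2)).sum < L then none
  else
    let p := pvPairScanB items np
    if 0 < p.2 then none
    else if nc ≠ 0 then pvCenterScanB p.1
    else some p.1

-- B's successors(slots, items): 'pre' carries slots[:k]
def pvSuccB (pre rest : List Int) (items : List (String × Int)) :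
    List (List Int × List (String × Int)) :=
  match rest with
  | [] => []
  | L :: rest' =>
      (match pvAllocB items L with
       | some nd => [(pre ++ rest', nd)]
       | none => []) ++ pvSuccB (pre ++ [L]) rest' items

-- 'nxt = set(); for (slots, items) in frontier: nxt.update(successors(slots, items))'
def pvNextB (frontier : List (List Int × List (String × Int))) :
    PySem.Set (List Int × List (String × Int)) :=
  frontier.foldl (fun acc st => PySem.Set.update acc (pvSuccB [] st.1 st.2)) PySem.Set.empty

-- 'for _ in range(len(slot_lengths)): ... if not nxt: break'
def pvBFSB : Nat → List (List Int × List (String × Int)) → Int → Int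
  | 0, _, depth => depth
  | n + 1, frontier, depth =>
      let nxt := pvNextB frontier
      if nxt = [] then depth else pvBFSB n nxt (depth + 1)

def max_palindromes_alt (slot_lengths : List Int) (char_freq : List (String × Int)) : Int :=
  pvBFSB slot_lengths.length
    (PySem.Set.ofList [(slot_lengths, (PySem.Dict.ofList char_freq).items)]) 0

-- ===== PRECONDITION & SPEC =====
def Spec_max_palindromes (slot_lengths : List Int) (char_freq : List (String × Int)) (out : Int) : Prop := out = max_palindromes_alt slot_lengths char_freq
instance (slot_lengths : List Int) (char_freq : List (String × Int)) (out : Int) : Decidable (Spec_max_palindromes slot_lengths char_freq out) := by unfold Spec_max_palindromes; infer_instance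

-- ===== CLAIM (what is proved, stated in full; the proofs are below) =====
def Claim_equal_max_palindromes : Prop := ∀ (slot_lengths : List Int) (char_freq : List (String × Int)), Dom_max_palindromes slot_lengths char_freq → Spec_max_palindromes slot_lengths char_freq (max_palindromes slot_lengths char_freq)

-- ===== LEMMAS AND PROOFS =====

-- fold-max toolkit
def pvFmax {α : Type} (f : α → Int) (l : List α) (a : Int) : Int :=
  l.foldl (fun m x => max m (f x)) a

lemma pvFmax_cons {α : Type} (f : α → Int) (x : α) (l : List α) (a : Int) :
    pvFmax f (x :: l) a = pvFmax f l (max a (f x)) := rfl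

lemma pvFmax_base_le {α : Type} (f : α → Int) (l : List α) (a : Int) : a ≤ pvFmax f l a := by
  induction l generalizing a with
  | nil => simp [pvFmax]
  | cons x l ih =>
      rw [pvFmax_cons]
      exact le_trans (le_max_left a (f x)) (ih (max a (f x)))

lemma pvFmax_le_of_mem {α : Type} (f : α → Int) {l : List α} {x : α} (hx : x ∈ l) (a : Int) :
    f x ≤ pvFmax f l a := by
  induction l generalizing a with
  | nil => cases hx
  | cons y l ih =>
      rw [pvFmax_cons]
      rcases List.mem_cons.mp hx with rfl | hx'
      · exact le_trans (le_max_right a (f x)) (pvFmax_base_le f l _)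
      · exact ih hx' _

lemma pvFmax_le {α : Type} (f : α → Int) {l : List α} {a c : Int} (ha : a ≤ c)
    (hl : ∀ x ∈ l, f x ≤ c) : pvFmax f l a ≤ c := by
  induction l generalizing a with
  | nil => exact ha
  | cons x l ih =>
      rw [pvFmax_cons]
      exact ih (max_le ha (hl x List.mem_cons_self)) (fun y hy => hl y (List.mem_cons_of_mem _ hy))

lemma pvFmax_zero {α : Type} (f : α → Int) {l : List α} (h : ∀ x ∈ l, f x = 0) :
    pvFmax f l 0 = 0 := by
  refine le_antisymm (pvFmax_le f le_rfl (fun x hx => le_of_eq (h x hx))) (pvFmax_base_le f l 0)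

-- assoc-list / Dict bridge
lemma pvGetD_mk_append_cons (pre rest : List (String × Int)) (c : String) (v : Int)
    (h : c ∉ pre.map Prod.fst) :
    (PySem.Dict.mk (pre ++ (c, v) :: rest)).getD c 0 = v := by
  induction pre with
  | nil => simp [PySem.Dict.getD, PySem.Dict.get?_mk_cons]
  | cons p pre ih =>
      obtain ⟨k, w⟩ := p
      simp only [List.map_cons, List.mem_cons, not_or] at h
      simp only [List.cons_append, PySem.Dict.getD, PySem.Dict.get?_mk_cons] at *
      rw [if_neg (by simpa [beq_iff_eq] using fun hc : k = c => h.1 hc.symm)]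
      exact ih h.2

lemma pvInsert_mk_append_cons (pre rest : List (String × Int)) (c : String) (v w : Int)
    (hpre : c ∉ pre.map Prod.fst) (hrest : c ∉ rest.map Prod.fst) :
    (PySem.Dict.mk (pre ++ (c, v) :: rest)).insert c w = PySem.Dict.mk (pre ++ (c, w) :: rest) := by
  have hc : (PySem.Dict.mk (pre ++ (c, v) :: rest)).contains c = true := by
    rw [PySem.Dict.contains_iff_mem_keys]
    simp [PySem.Dict.keys]
  rw [PySem.Dict.insert, if_pos hc]
  congr 1
  simp only [List.map_append, List.map_cons, beq_iff_eq]
  have hpre' : pre.map (fun p => if p.1 = c then (c, w) else p) = pre := by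
    rw [List.map_congr_left (g := id), List.map_id]
    intro p hp
    have : p.1 ≠ c := fun e => hpre (e ▸ List.mem_map_of_mem hp)
    simp [this]
  have hrest' : rest.map (fun p => if p.1 = c then (c, w) else p) = rest := by
    rw [List.map_congr_left (g := id), List.map_id]
    intro p hp
    have : p.1 ≠ c := fun e => hrest (e ▸ List.mem_map_of_mem hp)
    simp [this]
  simp [hpre', hrest']

-- pair loop: A's dict mutation = B's list scan
lemma pvFst_pvPairScanB (items : List (String × Int)) (r : Int) :
    ((pvPairScanB items r).1).map Prod.fst = items.map Prod.fst := by
  induction items generalizing r with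
  | nil => rfl
  | cons cv rest ih =>
      obtain ⟨c, v⟩ := cv
      rw [pvPairScanB]
      split
      · rfl
      · simpa using ih _

lemma pvPairLoopA_eq (post : List (String × Int)) : ∀ (pre : List (String × Int)) (r : Int),
    (((pre ++ post).map Prod.fst).Nodup) →
    pvPairLoopA (post.map Prod.fst) (PySem.Dict.mk (pre ++ post)) r
      = (PySem.Dict.mk (pre ++ (pvPairScanB post r).1), (pvPairScanB post r).2) := by
  induction post with
  | nil => intro pre r _; simp [pvPairLoopA, pvPairScanB]
  | cons cv rest ih =>
      intro pre r hnd
      obtain ⟨c, v⟩ := cv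
      have hmaps : ((pre ++ (c, v) :: rest).map Prod.fst)
          = pre.map Prod.fst ++ c :: rest.map Prod.fst := by simp
      rw [hmaps] at hnd
      have hmid := (List.nodup_cons.mp (List.nodup_middle.mp hnd)).1
      have hcpre : c ∉ pre.map Prod.fst := fun hc => hmid (List.mem_append.mpr (Or.inl hc))
      have hcrest : c ∉ rest.map Prod.fst := fun hc => hmid (List.mem_append.mpr (Or.inr hc))
      rw [List.map_cons, pvPairLoopA, pvPairScanB]
      simp only [pvGetD_mk_append_cons pre rest c v hcpre,
        pvInsert_mk_append_cons pre rest c v _ hcpre hcrest]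
      split
      next hr => rw [hr]; simp [mul_comm]
      · have hnd' : (((pre ++ [(c, v - min (PySem.Int.floordiv v 2) r * 2)]) ++ rest).map
            Prod.fst).Nodup := by
          simpa using (by simpa using hnd : (pre.map Prod.fst ++ c :: rest.map Prod.fst).Nodup)
        have := ih (pre ++ [(c, v - min (PySem.Int.floordiv v 2) r * 2)])
          (r - min (PySem.Int.floordiv v 2) r) hnd'
        simp only [List.append_assoc, List.singleton_append] at this
        rw [this]
        simp [mul_comm]

-- center loop: A's dict mutation = B's list scan
lemma pvFst_pvCenterScanB (items out : List (String × Int)) (h : pvCenterScanB items = some out) :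
    out.map Prod.fst = items.map Prod.fst := by
  induction items generalizing out with
  | nil => simp [pvCenterScanB] at h
  | cons cv rest ih =>
      obtain ⟨c, v⟩ := cv
      rw [pvCenterScanB] at h
      split at h
      · cases h; simp
      · rcases Option.map_eq_some_iff.mp h with ⟨out', hout', rfl⟩
        simpa using ih out' hout' 

lemma pvCenterLoopA_eq (post : List (String × Int)) : ∀ (pre : List (String × Int)),
    (((pre ++ post).map Prod.fst).Nodup) →
    pvCenterLoopA (post.map Prod.fst) (PySem.Dict.mk (pre ++ post))
      = (pvCenterScanB post).map (fun out => PySem.Dict.mk (pre ++ out)) := by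
  induction post with
  | nil => intro pre _; simp [pvCenterLoopA, pvCenterScanB]
  | cons cv rest ih =>
      intro pre hnd
      obtain ⟨c, v⟩ := cv
      have hmaps : ((pre ++ (c, v) :: rest).map Prod.fst)
          = pre.map Prod.fst ++ c :: rest.map Prod.fst := by simp
      rw [hmaps] at hnd
      have hmid := (List.nodup_cons.mp (List.nodup_middle.mp hnd)).1
      have hcpre : c ∉ pre.map Prod.fst := fun hc => hmid (List.mem_append.mpr (Or.inl hc))
      have hcrest : c ∉ rest.map Prod.fst := fun hc => hmid (List.mem_append.mpr (Or.inr hc))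
      rw [List.map_cons, pvCenterLoopA, pvCenterScanB]
      simp only [pvGetD_mk_append_cons pre rest c v hcpre,
        pvInsert_mk_append_cons pre rest c v _ hcpre hcrest]
      split
      · rfl
      · have hnd' : (((pre ++ [(c, v)]) ++ rest).map Prod.fst).Nodup := by
          simpa using (by simpa using hnd : (pre.map Prod.fst ++ c :: rest.map Prod.fst).Nodup)
        have := ih (pre ++ [(c, v)]) hnd'
        simp only [List.append_assoc, List.singleton_append] at this
        rw [this, Option.map_map]
        rfl

lemma pvFst_pvAllocB (items nd : List (String × Int)) (L : Int) (h : pvAllocB items L = some nd) :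
    nd.map Prod.fst = items.map Prod.fst := by
  simp only [pvAllocB] at h
  split at h
  · cases h
  · split at h
    · cases h
    · split at h
      · cases h
      · split at h
        · rw [pvFst_pvCenterScanB _ _ h, pvFst_pvPairScanB]
        · cases h; rw [pvFst_pvPairScanB]

lemma pvAllocA_eq (items : List (String × Int)) (L : Int) (h : (items.map Prod.fst).Nodup) :
    pvAllocA (PySem.Dict.mk items) L = (pvAllocB items L).map PySem.Dict.mk := by
  have hnd0 : (([] ++ items).map Prod.fst).Nodup := by simpa using h
  have hpair := pvPairLoopA_eq items [] (PySem.Int.floordiv L 2) hnd0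
  simp only [List.nil_append] at hpair
  have hnd1 : (([] ++ (pvPairScanB items (PySem.Int.floordiv L 2)).1).map Prod.fst).Nodup := by
    simpa [pvFst_pvPairScanB] using h
  have hcen := pvCenterLoopA_eq (pvPairScanB items (PySem.Int.floordiv L 2)).1 [] hnd1
  simp only [List.nil_append] at hcen
  simp only [pvAllocA, pvAllocB, PySem.Dict.values, PySem.Dict.keys,
    List.map_map, Function.comp_def, hpair]
  split
  · rfl
  · split
    · rfl
    · split
      · rfl
      · split
        · rw [hcen]
        · rfl

-- successor list facts
lemma pvSuccB_length (items : List (String × Int)) :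
    ∀ (rest pre : List Int) t, t ∈ pvSuccB pre rest items →
    t.1.length + 1 = pre.length + rest.length := by
  intro rest
  induction rest with
  | nil => intro pre t ht; cases ht
  | cons L rest ih =>
      intro pre t ht
      rw [pvSuccB, List.mem_append] at ht
      rcases ht with ht | ht
      · split at ht
        · rcases List.mem_singleton.mp ht with rfl
          simp; omega
        · cases ht
      · have := ih (pre ++ [L]) t ht
        simp at this ⊢
        omega

lemma pvSuccB_fst (items : List (String × Int)) :
    ∀ (rest pre : List Int) t, t ∈ pvSuccB pre rest items →
    t.2.map Prod.fst = items.map Prod.fst := by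
  intro rest
  induction rest with
  | nil => intro pre t ht; cases ht
  | cons L rest ih =>
      intro pre t ht
      rw [pvSuccB, List.mem_append] at ht
      rcases ht with ht | ht
      · split at ht
        · next nd halloc =>
            rcases List.mem_singleton.mp ht with rfl
            exact pvFst_pvAllocB items nd L halloc
        · cases ht
      · exact ih (pre ++ [L]) t ht

-- slicing out slot i of pre ++ L :: rest'
lemma pvSlice_out (pre rest' : List Int) (L : Int) :
    PySem.List.slice (pre ++ L :: rest') none (some (pre.length : Int)) ++
      PySem.List.slice (pre ++ L :: rest') (some ((pre.length : Int) + 1)) none = pre ++ rest' := by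
  rw [PySem.List.slice_to _ (by omega : (0:Int) ≤ (pre.length : Int)),
      PySem.List.slice_from _ (by omega : (0:Int) ≤ (pre.length : Int) + 1)]
  have h1 : ((pre.length : Int)).toNat = pre.length := by omega
  have h2 : ((pre.length : Int) + 1).toNat = pre.length + 1 := by omega
  rw [h1, h2]
  have h3 : pre ++ L :: rest' = (pre ++ [L]) ++ rest' := by simp
  rw [List.take_left' rfl, h3, List.drop_left' (by simp)]

-- the central correspondence: A's slot loop = fold of max over B's successor list
lemma pvTryA_eq (rest : List Int) : ∀ (slots pre : List Int) (i : Nat)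
    (f : PySem.Dict String Int) (mc : Int) (hs : slots = pre ++ rest) (hi : i = pre.length)
    (h : i + rest.length = slots.length) (hnd : f.keys.Nodup),
    pvTryA slots f i rest mc h
      = pvFmax (fun t => 1 + pvBacktrackA t.1 (PySem.Dict.mk t.2)) (pvSuccB pre rest f.items) mc := by
  induction rest with
  | nil =>
      intro slots pre i f mc hs hi h hnd
      rw [pvTryA, pvSuccB]
      rfl
  | cons L rest' ih =>
      intro slots pre i f mc hs hi h hnd
      have ha : pvAllocA f L = (pvAllocB f.items L).map PySem.Dict.mk :=
        pvAllocA_eq f.items L hnd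
      have hslice : PySem.List.slice slots none (some (i : Int)) ++
          PySem.List.slice slots (some ((i : Int) + 1)) none = pre ++ rest' := by
        rw [hs, hi]; exact pvSlice_out pre rest' L
      rw [pvTryA, pvSuccB]
      simp only [ha, hslice]
      cases hb : pvAllocB f.items L with
      | none =>
          simp only [Option.map_none, List.nil_append]
          exact ih slots (pre ++ [L]) (i + 1) f mc (by simp [hs]) (by simp [hi])
            (by simp only [List.length_cons] at h; omega) hnd
      | some nd =>
          simp only [Option.map_some, List.singleton_append, pvFmax_cons]
          exact ih slots (pre ++ [L]) (i + 1) f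
            (max mc (1 + pvBacktrackA (pre ++ rest') (PySem.Dict.mk nd)))
            (by simp [hs]) (by simp [hi])
            (by simp only [List.length_cons] at h; omega) hnd

lemma pvBacktrackA_eq (slots : List Int) (f : PySem.Dict String Int) (hnd : f.keys.Nodup) :
    pvBacktrackA slots f
      = pvFmax (fun t => 1 + pvBacktrackA t.1 (PySem.Dict.mk t.2)) (pvSuccB [] slots f.items) 0 := by
  rw [pvBacktrackA]
  split
  · next hsl => subst hsl; rw [pvSuccB]; rfl
  · exact pvTryA_eq slots slots [] 0 f 0 rfl rfl (by simp) hnd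

lemma pvBacktrackA_nil (f : PySem.Dict String Int) : pvBacktrackA [] f = 0 := by
  rw [pvBacktrackA]; simp

lemma pvBacktrackA_nonneg (slots : List Int) (f : PySem.Dict String Int) (hnd : f.keys.Nodup) :
    0 ≤ pvBacktrackA slots f := by
  rw [pvBacktrackA_eq slots f hnd]; exact pvFmax_base_le _ _ _

lemma pvMem_pvNextB (F : List (List Int × List (String × Int)))
    (t : List Int × List (String × Int)) :
    t ∈ pvNextB F ↔ ∃ s ∈ F, t ∈ pvSuccB [] s.1 s.2 := by
  have key : ∀ (G : List (List Int × List (String × Int)))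
      (acc : PySem.Set (List Int × List (String × Int))),
      t ∈ G.foldl (fun acc st => PySem.Set.update acc (pvSuccB [] st.1 st.2)) acc ↔
        t ∈ acc ∨ ∃ s ∈ G, t ∈ pvSuccB [] s.1 s.2 := by
    intro G
    induction G with
    | nil => intro acc; simp
    | cons s G ih =>
        intro acc
        rw [List.foldl_cons, ih, PySem.Set.mem_update]
        constructor
        · rintro ((h | h) | ⟨u, hu, ht⟩)
          · exact Or.inl h
          · exact Or.inr ⟨s, List.mem_cons_self, h⟩
          · exact Or.inr ⟨u, List.mem_cons_of_mem _ hu, ht⟩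
        · rintro (h | ⟨u, hu, ht⟩)
          · exact Or.inl (Or.inl h)
          · rcases List.mem_cons.mp hu with rfl | hu'
            · exact Or.inl (Or.inr ht)
            · exact Or.inr ⟨u, hu', ht⟩
  rw [pvNextB, key]
  simp [PySem.Set.empty]

-- BFS levels = depth of A's search
lemma pvBFSB_eq : ∀ (fuel : Nat) (F : List (List Int × List (String × Int))) (depth : Int),
    F ≠ [] → (∀ s ∈ F, s.1.length ≤ fuel ∧ (s.2.map Prod.fst).Nodup) →
    pvBFSB fuel F depth
      = depth + pvFmax (fun s => pvBacktrackA s.1 (PySem.Dict.mk s.2)) F 0 := by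
  intro fuel
  induction fuel with
  | zero =>
      intro F depth hne hinv
      rw [pvBFSB, pvFmax_zero]
      · omega
      · intro s hs
        have h0 : s.1 = [] := List.length_eq_zero_iff.mp (Nat.le_zero.mp (hinv s hs).1)
        rw [h0, pvBacktrackA_nil]
  | succ n ihf =>
      intro F depth hne hinv
      have hndmk : ∀ s ∈ F, (PySem.Dict.mk s.2).keys.Nodup := fun s hs => (hinv s hs).2
      rw [pvBFSB]
      by_cases hn : pvNextB F = []
      · rw [if_pos hn, pvFmax_zero]
        · omega
        · intro s hs
          have hsucc : pvSuccB [] s.1 s.2 = [] := by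
            rcases List.eq_nil_or_concat (pvSuccB [] s.1 s.2) with h | ⟨l, t, hlt⟩
            · exact h
            · exfalso
              have ht : t ∈ pvSuccB [] s.1 s.2 := by rw [hlt]; simp
              have : t ∈ pvNextB F := (pvMem_pvNextB F t).mpr ⟨s, hs, ht⟩
              rw [hn] at this; cases this
          rw [pvBacktrackA_eq s.1 (PySem.Dict.mk s.2) (hndmk s hs)]
          show pvFmax _ (pvSuccB [] s.1 (PySem.Dict.mk s.2).items) 0 = 0
          rw [show (PySem.Dict.mk s.2).items = s.2 from rfl, hsucc]
          rfl
      · rw [if_neg hn]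
        have hinv' : ∀ t ∈ pvNextB F, t.1.length ≤ n ∧ (t.2.map Prod.fst).Nodup := by
          intro t ht
          obtain ⟨s, hs, hts⟩ := (pvMem_pvNextB F t).mp ht
          refine ⟨?_, ?_⟩
          · have hlen := pvSuccB_length s.2 s.1 [] t hts
            have := (hinv s hs).1
            simp only [List.length_nil, Nat.zero_add] at hlen
            omega
          · rw [pvSuccB_fst s.2 s.1 [] t hts]; exact (hinv s hs).2
        rw [ihf (pvNextB F) (depth + 1) hn hinv']
        have hDnxt : ∀ t ∈ pvNextB F, 0 ≤ pvBacktrackA t.1 (PySem.Dict.mk t.2) :=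
          fun t ht => pvBacktrackA_nonneg t.1 (PySem.Dict.mk t.2) (hinv' t ht).2
        obtain ⟨t0, ht0⟩ := List.exists_mem_of_ne_nil _ hn
        have hM0 : (0:Int) ≤ pvFmax (fun s => pvBacktrackA s.1 (PySem.Dict.mk s.2)) (pvNextB F) 0 :=
          le_trans (hDnxt t0 ht0) (pvFmax_le_of_mem _ ht0 0)
        have hcorr : ∀ s ∈ F, pvBacktrackA s.1 (PySem.Dict.mk s.2)
            = pvFmax (fun t => 1 + pvBacktrackA t.1 (PySem.Dict.mk t.2)) (pvSuccB [] s.1 s.2) 0 :=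
          fun s hs => pvBacktrackA_eq s.1 (PySem.Dict.mk s.2) (hndmk s hs)
        have hkey : pvFmax (fun s => pvBacktrackA s.1 (PySem.Dict.mk s.2)) F 0
            = 1 + pvFmax (fun s => pvBacktrackA s.1 (PySem.Dict.mk s.2)) (pvNextB F) 0 := by
          apply le_antisymm
          · apply pvFmax_le _ (by omega)
            intro s hs
            rw [hcorr s hs]
            apply pvFmax_le _ (by omega)
            intro t ht
            have : t ∈ pvNextB F := (pvMem_pvNextB F t).mpr ⟨s, hs, ht⟩
            have := pvFmax_le_of_mem (fun s => pvBacktrackA s.1 (PySem.Dict.mk s.2)) this 0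
            omega
          · obtain ⟨s0, hs0, hts0⟩ := (pvMem_pvNextB F t0).mp ht0
            have hone : (1:Int) ≤ pvFmax (fun s => pvBacktrackA s.1 (PySem.Dict.mk s.2)) F 0 := by
              have h1 : 1 + pvBacktrackA t0.1 (PySem.Dict.mk t0.2)
                  ≤ pvBacktrackA s0.1 (PySem.Dict.mk s0.2) := by
                rw [hcorr s0 hs0]
                exact pvFmax_le_of_mem _ hts0 0
              have h2 := pvFmax_le_of_mem (fun s => pvBacktrackA s.1 (PySem.Dict.mk s.2)) hs0 (0:Int)
              have h3 := hDnxt t0 ht0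
              omega
            have : pvFmax (fun s => pvBacktrackA s.1 (PySem.Dict.mk s.2)) (pvNextB F) 0
                ≤ pvFmax (fun s => pvBacktrackA s.1 (PySem.Dict.mk s.2)) F 0 - 1 := by
              apply pvFmax_le _ (by omega)
              intro t ht
              obtain ⟨s, hs, hts⟩ := (pvMem_pvNextB F t).mp ht
              have h1 : 1 + pvBacktrackA t.1 (PySem.Dict.mk t.2)
                  ≤ pvBacktrackA s.1 (PySem.Dict.mk s.2) := by
                rw [hcorr s hs]
                exact pvFmax_le_of_mem _ hts 0
              have h2 := pvFmax_le_of_mem (fun s => pvBacktrackA s.1 (PySem.Dict.mk s.2)) hs (0:Int)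
              omega
            omega
        rw [hkey]
        omega

-- ===== VERDICT (by name: the statement is the Claim_ definition above) =====
theorem max_palindromes_spec : Claim_equal_max_palindromes := by
  intro slots cf _
  show max_palindromes slots cf = max_palindromes_alt slots cf
  unfold max_palindromes max_palindromes_alt
  have hstart : PySem.Set.ofList [(slots, (PySem.Dict.ofList cf).items)]
      = [(slots, (PySem.Dict.ofList cf).items)] := rfl
  rw [hstart, pvBFSB_eq slots.length [(slots, (PySem.Dict.ofList cf).items)] 0 (by simp) ?hinv]
  case hinv =>
    intro s hs
    rcases List.mem_singleton.mp hs with rfl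
    exact ⟨le_refl _, PySem.Dict.nodup_keys_ofList cf⟩
  have hD : pvBacktrackA slots (PySem.Dict.mk (PySem.Dict.ofList cf).items)
      = pvBacktrackA slots (PySem.Dict.ofList cf) := rfl
  have hnn : 0 ≤ pvBacktrackA slots (PySem.Dict.ofList cf) :=
    pvBacktrackA_nonneg slots _ (PySem.Dict.nodup_keys_ofList cf)
  show max_palindromes slots cf = 0 + pvFmax _ _ 0
  rw [show pvFmax (fun s => pvBacktrackA s.1 (PySem.Dict.mk s.2))
      [(slots, (PySem.Dict.ofList cf).items)] 0
      = max 0 (pvBacktrackA slots (PySem.Dict.ofList cf)) from rfl]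
  rw [max_eq_right hnn]
  show pvBacktrackA slots (PySem.Dict.ofList cf) = 0 + pvBacktrackA slots (PySem.Dict.ofList cf)
  omega
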